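-- pv_equiv track=rewrite | github.com/Sandesh1927/image_video_ai_guard | main.py | final_decision
-- ===== SOURCE A (Python) =====
-- def final_decision(links, text):
--     spam_keywords = [
--         "win money", "free reward", "click here",
--         "urgent", "verify now", "claim now",
--         "limited offer", "otp", "bank alert"
--     ]
--
--     for word in spam_keywords:
--         if word in text.lower():
--             return "DANGEROUS"
--
--     if len(links) > 0:
--         return "DANGEROUS"
--
--     return "SAFE"
-- ===== SOURCE B (Python) =====
-- _SPAM = ("win money", "free reward", "click here",
--          "urgent", "verify now", "claim now",
--          "limited offer", "otp", "bank alert")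
--
--
-- def final_decision(links, text):
--     # one left-to-right pass: at each position check whether any keyword starts there
--     low = text.lower()
--     for i in range(len(low) + 1):
--         if any(low.startswith(w, i) for w in _SPAM):
--             return "DANGEROUS"
--     return "DANGEROUS" if links else "SAFE"
-- ===== Notes on version B (the rewrite author's own statement) =====
-- stated objective: alternative
-- what changed: B scans the lowered text once position by position, testing at each position whether any keyword starts there (single-pass alternation match), instead of A's nine separate substring scans of the whole text.
import Mathlib
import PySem

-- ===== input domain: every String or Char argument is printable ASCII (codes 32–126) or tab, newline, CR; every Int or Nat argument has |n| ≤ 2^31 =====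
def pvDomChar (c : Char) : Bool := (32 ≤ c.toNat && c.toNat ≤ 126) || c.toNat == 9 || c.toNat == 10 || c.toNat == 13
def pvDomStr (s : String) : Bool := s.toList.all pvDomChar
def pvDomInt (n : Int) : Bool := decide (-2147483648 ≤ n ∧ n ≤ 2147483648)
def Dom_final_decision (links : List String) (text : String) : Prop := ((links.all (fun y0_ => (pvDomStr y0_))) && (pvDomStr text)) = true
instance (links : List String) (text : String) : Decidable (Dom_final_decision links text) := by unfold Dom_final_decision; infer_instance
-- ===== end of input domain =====

-- B scans the lowered text once position by position, testing whether any keyword starts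
-- at each position, instead of A's nine separate whole-text substring scans (alternative).

-- ===== PORT A =====
def pvSpamKeywords : List String :=
  ["win money", "free reward", "click here",
   "urgent", "verify now", "claim now",
   "limited offer", "otp", "bank alert"]

-- the 'for word in spam_keywords' loop: first keyword found in text.lower() returns DANGEROUS
def pvALoop (kws : List String) (text : String) : Option String :=
  match kws with
  | [] => none
  | w :: rest =>
    if PySem.Str.isIn w (PySem.Str.lower text) then some "DANGEROUS" else pvALoop rest text

def final_decision (links : List String) (text : String) : String :=
  match pvALoop pvSpamKeywords text with
  | some r => r
  | none => if links.length > 0 then "DANGEROUS" else "SAFE"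

-- ===== PORT B =====
def pvSpamChars : List (List Char) := pvSpamKeywords.map String.toList

-- Source B's position loop: at each suffix (position) test whether any keyword is a prefix there
def pvScan (kws : List (List Char)) (s : List Char) : Bool :=
  (kws.any fun k => k.isPrefixOf s) ||
    match s with
    | [] => false
    | _ :: rest => pvScan kws rest

def final_decision_alt (links : List String) (text : String) : String :=
  if pvScan pvSpamChars (PySem.Str.lower text).toList then "DANGEROUS"
  else if links.length > 0 then "DANGEROUS" else "SAFE"

-- ===== PRECONDITION & SPEC =====
def Spec_final_decision (links : List String) (text : String) (out : String) : Prop := out = final_decision_alt links text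
instance (links : List String) (text : String) (out : String) : Decidable (Spec_final_decision links text out) := by unfold Spec_final_decision; infer_instance

-- ===== CLAIM (what is proved, stated in full; the proofs are below) =====
def Claim_equal_final_decision : Prop := ∀ (links : List String) (text : String), Dom_final_decision links text → Spec_final_decision links text (final_decision links text)

-- ===== LEMMAS AND PROOFS =====

-- B's position scan finds a match iff some keyword is an infix
theorem pvScan_iff (kws : List (List Char)) (s : List Char) :
    pvScan kws s = true ↔ ∃ k ∈ kws, k <:+: s := by
  induction s with
  | nil =>
    simp [pvScan, List.any_eq_true, List.isPrefixOf_iff_prefix, List.infix_nil,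
      List.prefix_nil]
  | cons c rest ih =>
    rw [pvScan]
    simp only [Bool.or_eq_true, List.any_eq_true, List.isPrefixOf_iff_prefix, ih]
    constructor
    · rintro (⟨k, hk, hp⟩ | ⟨k, hk, hi⟩)
      · exact ⟨k, hk, hp.isInfix⟩
      · exact ⟨k, hk, hi.trans (List.suffix_cons c rest).isInfix⟩
    · rintro ⟨k, hk, hi⟩
      rcases List.infix_cons_iff.mp hi with hp | hi
      · exact Or.inl ⟨k, hk, hp⟩
      · exact Or.inr ⟨k, hk, hi⟩

-- A's keyword loop finds a match iff some keyword is an infix of the lowered text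
theorem pvALoop_iff (kws : List String) (text : String) :
    pvALoop kws text = (if ∃ k ∈ kws, k.toList <:+: (PySem.Str.lower text).toList
                        then some "DANGEROUS" else none) := by
  induction kws with
  | nil => simp [pvALoop]
  | cons w rest ih =>
    rw [pvALoop, ih]
    by_cases hw : PySem.Str.isIn w (PySem.Str.lower text) = true
    · rw [if_pos hw,
        if_pos (⟨w, List.mem_cons_self, (PySem.Str.isIn_iff_infix w (PySem.Str.lower text)).mp hw⟩ :
          ∃ k ∈ w :: rest, k.toList <:+: (PySem.Str.lower text).toList)]
    · rw [if_neg hw]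
      by_cases hr : ∃ k ∈ rest, k.toList <:+: (PySem.Str.lower text).toList
      · obtain ⟨k, hk, hi⟩ := hr
        rw [if_pos ⟨k, hk, hi⟩, if_pos ⟨k, List.mem_cons_of_mem _ hk, hi⟩]
      · rw [if_neg hr, if_neg]
        rintro ⟨k, hk, hi⟩
        rcases List.mem_cons.mp hk with rfl | hk
        · exact hw ((PySem.Str.isIn_iff_infix k (PySem.Str.lower text)).mpr hi)
        · exact hr ⟨k, hk, hi⟩

-- ===== VERDICT (by name: the statement is the Claim_ definition above) =====
theorem final_decision_spec : Claim_equal_final_decision := by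
  intro links text _
  unfold Spec_final_decision final_decision final_decision_alt
  rw [pvALoop_iff]
  have hmem : ∀ k, k ∈ pvSpamChars ↔ ∃ w ∈ pvSpamKeywords, w.toList = k := by
    intro k; simp [pvSpamChars]
  by_cases h : ∃ k ∈ pvSpamKeywords, k.toList <:+: (PySem.Str.lower text).toList
  · have hs : pvScan pvSpamChars (PySem.Str.lower text).toList = true := by
      rw [pvScan_iff]
      obtain ⟨k, hk, hi⟩ := h
      exact ⟨k.toList, (hmem _).mpr ⟨k, hk, rfl⟩, hi⟩
    rw [if_pos h, if_pos hs]
  · have hs : ¬ pvScan pvSpamChars (PySem.Str.lower text).toList = true := by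
      rw [pvScan_iff]
      rintro ⟨k, hk, hi⟩
      obtain ⟨w, hw, rfl⟩ := (hmem _).mp hk
      exact h ⟨w, hw, hi⟩
    rw [if_neg h, if_neg hs]
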